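-- pv_equiv track=rewrite | github.com/HXSecurity/DongTai | iast/utils.py | batch_queryset
-- ===== SOURCE A (Python) =====
-- def batch_queryset(queryset, batch_size=1):
--     iter_ = 0
--     while True:
--         queryset_ = list(queryset[iter_:iter_ + 1])
--         iter_ += 1
--         if not queryset_:
--             break
--         else:
--             yield queryset_[0]
-- ===== SOURCE B (Python) =====
-- def batch_queryset(queryset, batch_size=1):
--     # A's per-item slicing just walks the whole sequence one element at a
--     # time (batch_size is never used); a single direct iteration yields the
--     # exact same elements in the same order without any slice copies.
--     for item in queryset:
--         yield item
-- ===== Notes on version B (the rewrite author's own statement) =====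
-- stated objective: simpler
-- what changed: A walks the sequence by issuing a one-element slice query per index in a while-True loop (and never uses batch_size); B replaces that with a single direct for-loop over the queryset, yielding each item, with no index bookkeeping and no slice copies.
import Mathlib
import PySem

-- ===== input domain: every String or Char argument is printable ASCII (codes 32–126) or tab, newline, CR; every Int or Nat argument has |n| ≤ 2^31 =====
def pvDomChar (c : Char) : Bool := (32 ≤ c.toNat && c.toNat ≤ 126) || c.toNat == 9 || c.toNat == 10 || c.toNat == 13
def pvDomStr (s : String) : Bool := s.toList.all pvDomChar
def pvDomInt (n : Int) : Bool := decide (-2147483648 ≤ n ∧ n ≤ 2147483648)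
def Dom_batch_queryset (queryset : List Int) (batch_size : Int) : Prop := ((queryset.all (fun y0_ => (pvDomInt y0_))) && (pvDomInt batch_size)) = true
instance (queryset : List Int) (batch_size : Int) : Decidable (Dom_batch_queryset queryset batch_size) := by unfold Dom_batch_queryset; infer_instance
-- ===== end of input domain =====

-- B replaces A's per-index one-element slice loop by a single direct iteration over the list (simpler; same yielded elements; batch_size is unused by both).


-- ===== PORT A =====
-- the while-True loop: queryset_ = list(queryset[iter_:iter_+1]); iter_ += 1; break when empty, else yield queryset_[0].
-- iter_ starts at 0 and only ever increments, so it is carried as a Nat cast to Int at the slice.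
def batch_queryset_go (queryset : List Int) (iter_ : Nat) : List Int :=
  let queryset_ := PySem.List.slice queryset (some (iter_ : Int)) (some ((iter_ : Int) + 1))
  if h : queryset_ = [] then []
  else queryset_.head h :: batch_queryset_go queryset (iter_ + 1)
termination_by queryset.length - iter_
decreasing_by
  have h1 : PySem.List.slice queryset (some (iter_ : Int)) (some ((iter_ : Int) + 1))
      = (queryset.drop iter_).take 1 := by
    have := PySem.List.slice_natCast_add (xs := queryset) (j := iter_) (n := 1)
    simpa using this
  have h2 : (queryset.drop iter_).take 1 ≠ [] := by rw [← h1]; exact h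
  have h3 : queryset.drop iter_ ≠ [] := by
    intro hnil; exact h2 (by simp [hnil])
  have h4 : iter_ < queryset.length := by
    by_contra hge
    exact h3 (List.drop_eq_nil_of_le (by omega))
  omega

def batch_queryset (queryset : List Int) (batch_size : Int) : List Int :=
  batch_queryset_go queryset 0

-- ===== PORT B =====
-- 'for item in queryset: yield item' — direct structural iteration.
def batch_queryset_alt_go (queryset : List Int) : List Int :=
  match queryset with
  | [] => []
  | item :: rest => item :: batch_queryset_alt_go rest

def batch_queryset_alt (queryset : List Int) (batch_size : Int) : List Int :=
  batch_queryset_alt_go queryset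

-- ===== PRECONDITION & SPEC =====
def Spec_batch_queryset (queryset : List Int) (batch_size : Int) (out : List Int) : Prop := out = batch_queryset_alt queryset batch_size
instance (queryset : List Int) (batch_size : Int) (out : List Int) : Decidable (Spec_batch_queryset queryset batch_size out) := by unfold Spec_batch_queryset; infer_instance

-- ===== CLAIM (what is proved, stated in full; the proofs are below) =====
def Claim_equal_batch_queryset : Prop := ∀ (queryset : List Int) (batch_size : Int), Dom_batch_queryset queryset batch_size → Spec_batch_queryset queryset batch_size (batch_queryset queryset batch_size)

-- ===== LEMMAS AND PROOFS =====
theorem batch_queryset_go_eq_drop (queryset : List Int) (iter_ : Nat) :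
    batch_queryset_go queryset iter_ = queryset.drop iter_ := by
  by_cases hlt : iter_ < queryset.length
  · have h1 : PySem.List.slice queryset (some (iter_ : Int)) (some ((iter_ : Int) + 1))
        = (queryset.drop iter_).take 1 := by
      have := PySem.List.slice_natCast_add (xs := queryset) (j := iter_) (n := 1)
      simpa using this
    have hne : (queryset.drop iter_).take 1 ≠ [] := by
      have : queryset.drop iter_ ≠ [] := by
        intro hnil
        have := List.drop_eq_nil_iff.mp hnil
        omega
      cases hd : queryset.drop iter_ with
      | nil => exact absurd hd this
      | cons a t => simp
    rw [batch_queryset_go]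
    simp only [h1]
    rw [dif_neg hne]
    have ih := batch_queryset_go_eq_drop queryset (iter_ + 1)
    rw [ih]
    have hdropne : queryset.drop iter_ ≠ [] := by
      intro hnil; exact hne (by simp [hnil])
    obtain ⟨a, t, hd⟩ := List.exists_cons_of_ne_nil hdropne
    have hdrop : queryset.drop (iter_ + 1) = t := by
      have h5 : queryset.drop (iter_ + 1) = (queryset.drop iter_).drop 1 := by
        rw [List.drop_drop]
      rw [h5, hd]; simp
    simp [hd, hdrop]
  · have hnil : queryset.drop iter_ = [] := List.drop_eq_nil_of_le (by omega)
    have h1 : PySem.List.slice queryset (some (iter_ : Int)) (some ((iter_ : Int) + 1))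
        = (queryset.drop iter_).take 1 := by
      have := PySem.List.slice_natCast_add (xs := queryset) (j := iter_) (n := 1)
      simpa using this
    rw [batch_queryset_go]
    simp [h1, hnil]
termination_by queryset.length - iter_
decreasing_by omega

theorem batch_queryset_alt_go_eq (queryset : List Int) :
    batch_queryset_alt_go queryset = queryset := by
  induction queryset with
  | nil => rfl
  | cons a t ih => simp [batch_queryset_alt_go, ih]

-- ===== VERDICT (by name: the statement is the Claim_ definition above) =====
theorem batch_queryset_spec : Claim_equal_batch_queryset := by
  intro queryset batch_size _
  unfold Spec_batch_queryset batch_queryset batch_queryset_alt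
  rw [batch_queryset_go_eq_drop, batch_queryset_alt_go_eq]
  simp
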